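-- pv_equiv track=rewrite | github.com/cinematicsodium/Hack-In-Science | dyck_words.py | is_a_dyck_word
-- ===== SOURCE A (Python) =====
-- def is_a_dyck_word(word: str) -> bool:
--
--     def two_unique_chars(word):
--         return len(set(word)) == 2
--
--     def char_delta_zero(word):
--         wordSet = set(word)
--         delta = []
--         for char in wordSet:
--             delta.append(word.count(char))
--         return delta[0] - delta[1] == 0
--
--     def prefix_zero_plus(word):
--         initChar = word[0]
--         count = 0
--         for i in range(len(word)):
--             if word[i] == initChar:
--                 count += 1
--             else:
--                 count -= 1
--             if count < 0:
--                 return False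
--         return count >= 0
--
--     if len(word) == 0:
--         return True
--     if two_unique_chars(word):
--         if char_delta_zero(word):
--             if prefix_zero_plus(word):
--                 return True
--     return False
-- ===== SOURCE B (Python) =====
-- def is_a_dyck_word(word: str) -> bool:
--     if not word:
--         return True
--     if len(set(word)) != 2:
--         return False
--     opener = word[0]
--     opens = [i for i, ch in enumerate(word) if ch == opener]
--     closes = [i for i, ch in enumerate(word) if ch != opener]
--     return len(opens) == len(closes) and all(o < c for o, c in zip(opens, closes))
-- ===== Notes on version B (the rewrite author's own statement) =====
-- stated objective: alternative
-- what changed: B replaces A's running-balance machinery (per-character count list and an early-exit prefix counter scan) by an occurrence-pairing algorithm: it collects the index lists of opener and closer positions and accepts iff the lists have equal length and the i-th opener index precedes the i-th closer index for every i.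
import Mathlib
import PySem

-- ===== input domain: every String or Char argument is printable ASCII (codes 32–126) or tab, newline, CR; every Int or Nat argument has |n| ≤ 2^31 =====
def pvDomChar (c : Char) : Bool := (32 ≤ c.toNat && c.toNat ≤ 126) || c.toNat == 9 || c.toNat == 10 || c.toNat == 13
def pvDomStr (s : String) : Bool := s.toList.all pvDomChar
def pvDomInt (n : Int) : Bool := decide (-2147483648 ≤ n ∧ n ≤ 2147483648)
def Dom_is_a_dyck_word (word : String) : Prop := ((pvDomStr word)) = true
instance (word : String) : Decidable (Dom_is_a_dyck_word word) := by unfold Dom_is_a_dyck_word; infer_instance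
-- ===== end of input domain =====

-- B replaces A's running-balance passes by occurrence pairing: it collects the opener and
-- closer index lists and accepts iff they have equal length and the i-th opener index
-- precedes the i-th closer index for every i; objective: alternative algorithm.

-- ===== PORT A =====
def pvA_twoUniqueChars (word : String) : Bool :=
  PySem.Set.len (PySem.Set.ofList word.toList) == 2

def pvA_charDeltaZero (word : String) : Bool :=
  let wordSet := PySem.Set.ofList word.toList
  let delta : List Int :=
    wordSet.foldl (fun acc ch => acc ++ [(PySem.Str.count word (String.ofList [ch]) : Int)]) []
  -- delta[0]/delta[1]: IndexError unreachable, A calls this only when the set has two elements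
  ((PySem.List.pyGet? delta 0).getD 0 - (PySem.List.pyGet? delta 1).getD 0) == 0

def pvA_prefixLoop (initChar : Char) : List Char → Int → Bool
  | [], count => decide (0 ≤ count)
  | ch :: rest, count =>
      let count' := if ch == initChar then count + 1 else count - 1
      if count' < 0 then false else pvA_prefixLoop initChar rest count'

def pvA_prefixZeroPlus (word : String) : Bool :=
  -- word[0]: IndexError unreachable, A calls this only on nonempty words
  let initChar := (PySem.Str.pyGet? word 0).getD ' '
  -- 'for i in range(len(word)): word[i] …' visits exactly the characters of word in order
  pvA_prefixLoop initChar word.toList 0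

def is_a_dyck_word (word : String) : Bool :=
  if PySem.Str.len word == 0 then true
  else if pvA_twoUniqueChars word then
    if pvA_charDeltaZero word then
      if pvA_prefixZeroPlus word then true
      else false
    else false
  else false

-- ===== PORT B =====
def is_a_dyck_word_alt (word : String) : Bool :=
  if word.toList.isEmpty then true
  else if !(PySem.Set.len (PySem.Set.ofList word.toList) == 2) then false
  else
    let opener := (PySem.Str.pyGet? word 0).getD ' '
    let opens := ((PySem.List.enumerate word.toList 0).filter
      (fun q => q.2 == opener)).map (fun q => q.1)
    let closes := ((PySem.List.enumerate word.toList 0).filter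
      (fun q => !(q.2 == opener))).map (fun q => q.1)
    (opens.length == closes.length) && (opens.zip closes).all (fun q => decide (q.1 < q.2))

-- ===== PRECONDITION & SPEC =====
def Spec_is_a_dyck_word (word : String) (out : Bool) : Prop := out = is_a_dyck_word_alt word
instance (word : String) (out : Bool) : Decidable (Spec_is_a_dyck_word word out) := by unfold Spec_is_a_dyck_word; infer_instance

-- ===== CLAIM (what is proved, stated in full; the proofs are below) =====
def Claim_equal_is_a_dyck_word : Prop := ∀ (word : String), Dom_is_a_dyck_word word → Spec_is_a_dyck_word word (is_a_dyck_word word)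

-- ===== LEMMAS AND PROOFS =====

-- proof-only mirror of the enumerate/filter/map comprehensions: position lists
def pvPosns (p : Char → Bool) : List Char → Int → List Int
  | [], _ => []
  | x :: t, i => if p x then i :: pvPosns p t (i + 1) else pvPosns p t (i + 1)

theorem pv_posns_eq (p : Char → Bool) : ∀ (l : List Char) (s : Int),
    ((PySem.List.enumerate l s).filter (fun q => p q.2)).map (fun q => q.1) = pvPosns p l s := by
  intro l
  induction l with
  | nil => intro s; simp [pvPosns, PySem.List.enumerate_nil]
  | cons x t ih =>
      intro s
      by_cases h : p x = true <;>
        simp [pvPosns, PySem.List.enumerate_cons, h, ih]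

theorem pv_posns_lb (p : Char → Bool) : ∀ (l : List Char) (i : Int), ∀ m ∈ pvPosns p l i, i ≤ m := by
  intro l
  induction l with
  | nil => intro i m hm; simp [pvPosns] at hm
  | cons x t ih =>
      intro i m hm
      unfold pvPosns at hm
      split at hm
      · rcases List.mem_cons.mp hm with h | h
        · omega
        · have := ih (i + 1) m h; omega
      · have := ih (i + 1) m hm; omega

theorem pv_posns_ub (p : Char → Bool) : ∀ (l : List Char) (i : Int), ∀ m ∈ pvPosns p l i, m < i + l.length := by
  intro l
  induction l with
  | nil => intro i m hm; simp [pvPosns] at hm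
  | cons x t ih =>
      intro i m hm
      unfold pvPosns at hm
      simp only [List.length_cons]
      split at hm
      · rcases List.mem_cons.mp hm with h | h
        · subst h; push_cast; omega
        · have := ih (i + 1) m h; push_cast at this ⊢; omega
      · have := ih (i + 1) m hm; push_cast at this ⊢; omega

theorem pv_posns_pairwise (p : Char → Bool) : ∀ (l : List Char) (i : Int),
    (pvPosns p l i).Pairwise (· < ·) := by
  intro l
  induction l with
  | nil => intro i; simp [pvPosns]
  | cons x t ih =>
      intro i
      unfold pvPosns
      split
      · exact List.pairwise_cons.mpr ⟨fun m hm => by have := pv_posns_lb p t (i + 1) m hm; omega, ih (i + 1)⟩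
      · exact ih (i + 1)

theorem pv_posns_length (p : Char → Bool) : ∀ (l : List Char) (i : Int),
    (pvPosns p l i).length = l.countP p := by
  intro l
  induction l with
  | nil => intro i; simp [pvPosns]
  | cons x t ih =>
      intro i
      unfold pvPosns
      by_cases h : p x = true <;> simp [h, ih, List.countP_cons]

theorem pv_posns_countP (p : Char → Bool) : ∀ (l : List Char) (i : Int) (k : Nat),
    (pvPosns p l i).countP (fun m => decide (m < i + (k : Int))) = (l.take k).countP p := by
  intro l
  induction l with
  | nil => intro i k; simp [pvPosns]
  | cons x t ih =>
      intro i k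
      cases k with
      | zero =>
          simp only [Nat.cast_zero, add_zero, List.take_zero, List.countP_nil]
          refine List.countP_eq_zero.mpr ?_
          intro m hm
          have := pv_posns_lb p (x :: t) i m hm
          simp only [decide_eq_true_eq]
          omega
      | succ k' =>
          have hcast : i + ((k' + 1 : Nat) : Int) = (i + 1) + (k' : Int) := by push_cast; ring
          have hfun : (fun m : Int => decide (m < i + ((k' + 1 : Nat) : Int)))
              = (fun m : Int => decide (m < (i + 1) + (k' : Int))) := by
            funext m; rw [hcast]
          have hih := ih (i + 1) k'
          unfold pvPosns
          by_cases h : p x = true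
          · rw [if_pos h, hfun, List.countP_cons, hih, List.take_succ_cons, List.countP_cons]
            have hd : i < i + 1 + (k' : Int) := by omega
            simp [h, hd]
          · rw [if_neg h, hfun, hih, List.take_succ_cons, List.countP_cons]
            simp [h]

theorem pv_sorted_get_iff : ∀ (O : List Int), O.Pairwise (· < ·) →
    ∀ (j : Nat) (m : Int), O[j]? = some m →
      ∀ t : Int, (m < t ↔ j < O.countP (fun x => decide (x < t))) := by
  intro O
  induction O with
  | nil => intro _ j m hm; simp at hm
  | cons x rest ih =>
      intro hp j m hm t
      have hx : ∀ y ∈ rest, x < y := (List.pairwise_cons.mp hp).1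
      have hrest : rest.Pairwise (· < ·) := (List.pairwise_cons.mp hp).2
      have hc : (x :: rest).countP (fun y => decide (y < t))
          = rest.countP (fun y => decide (y < t)) + (if x < t then 1 else 0) := by
        simp [List.countP_cons]
      rw [hc]
      cases j with
      | zero =>
          have hmx : x = m := by simpa using hm
          by_cases ht : x < t
          · rw [if_pos ht]
            constructor
            · intro _; omega
            · intro _; omega
          · rw [if_neg ht]
            have h0 : rest.countP (fun y => decide (y < t)) = 0 := by
              refine List.countP_eq_zero.mpr ?_
              intro y hy
              have := hx y hy
              simp only [decide_eq_true_eq]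
              omega
            rw [h0]
            constructor
            · intro hmt; omega
            · intro h; omega
      | succ j' =>
          have hm' : rest[j']? = some m := by simpa using hm
          have hmem : m ∈ rest := List.mem_of_getElem? hm'
          have hxm : x < m := hx m hmem
          have hiff := ih hrest j' m hm' t
          by_cases ht : x < t
          · rw [if_pos ht]
            constructor
            · intro h; have := hiff.mp h; omega
            · intro h; exact hiff.mpr (by omega)
          · rw [if_neg ht]
            have h0 : rest.countP (fun y => decide (y < t)) = 0 := by
              refine List.countP_eq_zero.mpr ?_
              intro y hy
              have := hx y hy
              simp only [decide_eq_true_eq]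
              omega
            rw [h0]
            constructor
            · intro hmt; omega
            · intro h; omega

theorem pv_zip_all_iff (O C : List Int) :
    ((O.zip C).all (fun q => decide (q.1 < q.2)) = true)
      ↔ ∀ (j : Nat) (a b : Int), O[j]? = some a → C[j]? = some b → a < b := by
  rw [List.all_eq_true]
  constructor
  · intro h j a b ha hb
    have hja : j < O.length := by
      rcases List.getElem?_eq_some_iff.mp ha with ⟨h', _⟩; exact h'
    have hjb : j < C.length := by
      rcases List.getElem?_eq_some_iff.mp hb with ⟨h', _⟩; exact h'
    have hav : O[j] = a := by
      rcases List.getElem?_eq_some_iff.mp ha with ⟨h', hv⟩; exact hv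
    have hbv : C[j] = b := by
      rcases List.getElem?_eq_some_iff.mp hb with ⟨h', hv⟩; exact hv
    have hmem : (a, b) ∈ O.zip C := by
      rw [List.mem_iff_getElem]
      refine ⟨j, by simp [List.length_zip]; omega, ?_⟩
      simp [List.getElem_zip, hav, hbv]
    simpa using h _ hmem
  · intro h q hq
    obtain ⟨j, hj, hv⟩ := List.mem_iff_getElem.mp hq
    have hjo : j < O.length := by simp [List.length_zip] at hj; omega
    have hjc : j < C.length := by simp [List.length_zip] at hj; omega
    rw [List.getElem_zip] at hv
    have := h j O[j] C[j] (List.getElem?_eq_getElem hjo) (List.getElem?_eq_getElem hjc)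
    rw [← hv]
    simpa using this

theorem pv_loop_iff (init : Char) : ∀ (l : List Char) (b : Int), 0 ≤ b →
    (pvA_prefixLoop init l b = true
      ↔ ∀ k ≤ l.length, 0 ≤ b + 2 * (((l.take k).countP (fun ch => ch == init) : Int)) - (k : Int)) := by
  intro l
  induction l with
  | nil =>
      intro b hb
      simp only [pvA_prefixLoop, List.length_nil, decide_eq_true_eq]
      constructor
      · intro _ k hk
        have : k = 0 := Nat.le_zero.mp hk
        subst this; simpa
      · intro _; exact hb
  | cons x t ih =>
      intro b hb
      simp only [pvA_prefixLoop]
      by_cases hneg : (if (x == init) = true then b + 1 else b - 1) < 0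
      · rw [if_pos hneg]
        simp only [Bool.false_eq_true, false_iff]
        intro hall
        have h1 := hall 1 (by simp)
        have hc1 : ((x :: t).take 1).countP (fun ch => ch == init)
            = if (x == init) = true then 1 else 0 := by
          by_cases hx : (x == init) = true <;> simp [hx, List.countP_cons]
        rw [hc1] at h1
        by_cases hx : (x == init) = true <;> simp [hx] at h1 hneg <;> omega
      · rw [if_neg hneg]
        rw [ih _ (by by_cases hx : (x == init) = true <;> simp [hx] at hneg ⊢ <;> omega)]
        constructor
        · intro h k hk
          cases k with
          | zero => simpa using hb
          | succ k' =>
              have hk' : k' ≤ t.length := by simpa using hk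
              have := h k' hk'
              simp only [List.take_succ_cons, List.countP_cons] at *
              by_cases hx : (x == init) = true <;> simp [hx] at this ⊢ <;> push_cast at this ⊢ <;> omega
        · intro h k hk
          have := h (k + 1) (by simpa using Nat.succ_le_succ hk)
          simp only [List.take_succ_cons, List.countP_cons] at this
          by_cases hx : (x == init) = true <;> simp [hx] at this ⊢ <;> push_cast at this ⊢ <;> omega

theorem pv_zip_iff (c : Char) (l : List Char)
    (hn : l.countP (fun ch => ch == c) = l.countP (fun ch => !(ch == c))) :
    ((∀ (j : Nat) (a b : Int), (pvPosns (fun ch => ch == c) l 0)[j]? = some a →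
        (pvPosns (fun ch => !(ch == c)) l 0)[j]? = some b → a < b)
      ↔ ∀ k ≤ l.length, 0 ≤ 2 * (((l.take k).countP (fun ch => ch == c) : Int)) - (k : Int)) := by
  have hOcnt : ∀ k : Nat, (pvPosns (fun ch => ch == c) l 0).countP (fun m => decide (m < (k : Int)))
      = (l.take k).countP (fun ch => ch == c) := by
    intro k; simpa using pv_posns_countP (fun ch => ch == c) l 0 k
  have hCcnt : ∀ k : Nat, (pvPosns (fun ch => !(ch == c)) l 0).countP (fun m => decide (m < (k : Int)))
      = (l.take k).countP (fun ch => !(ch == c)) := by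
    intro k; simpa using pv_posns_countP (fun ch => !(ch == c)) l 0 k
  have hOlen := pv_posns_length (fun ch => ch == c) l 0
  have hClen := pv_posns_length (fun ch => !(ch == c)) l 0
  have hsum : ∀ k : Nat, k ≤ l.length →
      (l.take k).countP (fun ch => ch == c) + (l.take k).countP (fun ch => !(ch == c)) = k := by
    intro k hk
    have := (List.length_eq_countP_add_countP (p := fun ch => ch == c) (l := l.take k)).symm
    simpa [List.length_take, Nat.min_eq_left hk] using this
  have hmono : ∀ k : Nat, (l.take k).countP (fun ch => ch == c) ≤ l.countP (fun ch => ch == c) :=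
    fun k => List.Sublist.countP_le (List.take_sublist k l)
  have hmonoN : ∀ k : Nat, (l.take k).countP (fun ch => !(ch == c)) ≤ l.countP (fun ch => !(ch == c)) :=
    fun k => List.Sublist.countP_le (List.take_sublist k l)
  constructor
  · intro hzip k hk
    by_contra hcon
    push_neg at hcon
    set a := (l.take k).countP (fun ch => ch == c) with ha
    have hd : (l.take k).countP (fun ch => !(ch == c)) = k - a := by
      have := hsum k hk; omega
    have hklarge : a + a < k := by
      -- 0 > 2a - k
      have : (2 : Int) * (a : Int) - (k : Int) < 0 := by omega
      push_cast at this; omega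
    have h1 : (l.take k).countP (fun ch => !(ch == c)) ≤ l.countP (fun ch => !(ch == c)) := hmonoN k
    rw [hd, ← hn] at h1
    have h3 : a ≤ l.countP (fun ch => ch == c) := hmono k
    have haN : a < l.countP (fun ch => ch == c) := by omega
    have haC : a < (pvPosns (fun ch => !(ch == c)) l 0).length := by
      rw [hClen, ← hn]; exact haN
    have haO : a < (pvPosns (fun ch => ch == c) l 0).length := by
      rw [hOlen]; exact haN
    have hbq := List.getElem?_eq_getElem haC
    have haq := List.getElem?_eq_getElem haO
    set b := (pvPosns (fun ch => !(ch == c)) l 0)[a] with hbdef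
    set a' := (pvPosns (fun ch => ch == c) l 0)[a] with hadef
    have hab := hzip a a' b haq hbq
    have hbk : b < (k : Int) := by
      have := (pv_sorted_get_iff _ (pv_posns_pairwise _ l 0) a b hbq (k : Int)).mpr
      apply this
      rw [hCcnt k, hd]
      omega
    have : a' < (k : Int) := by omega
    have hcontra := (pv_sorted_get_iff _ (pv_posns_pairwise _ l 0) a a' haq (k : Int)).mp this
    rw [hOcnt k, ← ha] at hcontra
    omega
  · intro hpre j a b hja hjb
    have hjC : j < (pvPosns (fun ch => !(ch == c)) l 0).length := by
      rcases List.getElem?_eq_some_iff.mp hjb with ⟨h', _⟩; exact h'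
    have hjO : j < (pvPosns (fun ch => ch == c) l 0).length := by
      rcases List.getElem?_eq_some_iff.mp hja with ⟨h', _⟩; exact h'
    have hbmem : b ∈ pvPosns (fun ch => !(ch == c)) l 0 := List.mem_of_getElem? hjb
    have hb0 : (0 : Int) ≤ b := pv_posns_lb _ l 0 b hbmem
    have hblen : b < (0 : Int) + l.length := pv_posns_ub _ l 0 b hbmem
    set bn := b.toNat with hbn
    have hbcast : (bn : Int) = b := Int.toNat_of_nonneg hb0
    have hbnlen : bn < l.length := by omega
    -- C.countP (< b) ≤ j
    have hCb : (l.take bn).countP (fun ch => !(ch == c)) ≤ j := by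
      have hiff := pv_sorted_get_iff _ (pv_posns_pairwise (fun ch => !(ch == c)) l 0) j b hjb (b : Int)
      have : ¬ j < (pvPosns (fun ch => !(ch == c)) l 0).countP (fun x => decide (x < b)) := by
        intro hlt
        have := hiff.mpr hlt
        omega
      rw [← hbcast] at this
      rw [hCcnt bn] at this
      omega
    -- j < C.countP (< b + 1)
    have hCb1 : j + 1 ≤ (l.take (bn + 1)).countP (fun ch => !(ch == c)) := by
      have hiff := pv_sorted_get_iff _ (pv_posns_pairwise (fun ch => !(ch == c)) l 0) j b hjb (b + 1)
      have hlt := hiff.mp (by omega)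
      have hc : (b : Int) + 1 = ((bn + 1 : Nat) : Int) := by push_cast; omega
      rw [hc, hCcnt (bn + 1)] at hlt
      omega
    have hsum1 := hsum (bn + 1) (by omega)
    have hsum0 := hsum bn (by omega)
    have hp1 := hpre (bn + 1) (by omega)
    -- derive bn ≥ 2j + 1 then count of openers in take bn ≥ j + 1
    have hOk : j + 1 ≤ (l.take bn).countP (fun ch => ch == c) := by
      have h2f : 2 * ((l.take (bn + 1)).countP (fun ch => !(ch == c))) ≤ bn + 1 := by
        have : (0:Int) ≤ 2 * ((l.take (bn+1)).countP (fun ch => ch == c) : Int) - ((bn+1 : Nat) : Int) := hp1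
        push_cast at this
        omega
      omega
    -- conclude a < b via O
    have hiff := pv_sorted_get_iff _ (pv_posns_pairwise (fun ch => ch == c) l 0) j a hja (b : Int)
    apply hiff.mpr
    rw [← hbcast, hOcnt bn]
    omega

-- character bookkeeping for the two-distinct-characters case
theorem pv_count_go_singleton (c : Char) : ∀ (l : List Char) (fuel acc : Nat), l.length ≤ fuel →
    PySem.Chars.count.go [c] fuel l acc = acc + l.count c := by
  intro l
  induction l with
  | nil => intro fuel acc _; cases fuel <;> simp [PySem.Chars.count.go]
  | cons h t ih =>
      intro fuel acc hf
      cases fuel with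
      | zero => simp at hf
      | succ n =>
          have ht : t.length ≤ n := by simpa using hf
          by_cases hc : (c == h) = true
          · have hch : c = h := by simpa using hc
            subst hch
            have hstep : PySem.Chars.count.go [c] (n + 1) (c :: t) acc
                = PySem.Chars.count.go [c] n t (acc + 1) := by
              simp [PySem.Chars.count.go, List.isPrefixOf]
            rw [hstep, ih n (acc + 1) ht, List.count_cons_self]
            omega
          · have hch : ¬ c = h := by simpa using hc
            have hstep : PySem.Chars.count.go [c] (n + 1) (h :: t) acc
                = PySem.Chars.count.go [c] n t acc := by
              simp [PySem.Chars.count.go, List.isPrefixOf, hc]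
            rw [hstep, ih n acc ht]
            simp [Ne.symm hch]

theorem pv_count_singleton (l : List Char) (c : Char) :
    PySem.Chars.count l [c] = l.count c := by
  have := pv_count_go_singleton c l l.length 0 le_rfl
  simpa [PySem.Chars.count] using this

theorem pv_prefix_foldl_add : ∀ (l s : List Char), s <+: l.foldl PySem.Set.add s := by
  intro l
  induction l with
  | nil => intro s; exact List.prefix_refl s
  | cons x t ih =>
      intro s
      refine List.IsPrefix.trans ?_ (ih (PySem.Set.add s x))
      unfold PySem.Set.add
      split
      · exact List.prefix_refl s
      · exact List.prefix_append s [x]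

theorem pv_set_two (c : Char) (rest : List Char)
    (h2 : (PySem.Set.ofList (c :: rest)).length = 2) :
    ∃ d, PySem.Set.ofList (c :: rest) = [c, d] := by
  have h0 : PySem.Set.ofList (c :: rest) = rest.foldl PySem.Set.add [c] := by
    simp [PySem.Set.ofList, PySem.Set.add, PySem.Set.contains]
  have hpre : [c] <+: PySem.Set.ofList (c :: rest) := by
    rw [h0]; exact pv_prefix_foldl_add rest [c]
  obtain ⟨t, hts⟩ := hpre
  rw [← hts] at h2 ⊢
  simp at h2
  match t, h2 with
  | [d], _ => exact ⟨d, rfl⟩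

theorem pv_countP_eq_count (c : Char) (l : List Char) :
    l.countP (fun ch => ch == c) = l.count c := rfl

theorem pv_countP_not_eq_count (c d : Char) :
    ∀ l : List Char, (∀ e ∈ l, e = c ∨ e = d) → c ≠ d →
      l.countP (fun ch => !(ch == c)) = l.count d := by
  intro l
  induction l with
  | nil => intro _ _; simp
  | cons e t ih =>
      intro he hcd
      have ht := ih (fun x hx => he x (List.mem_cons_of_mem _ hx)) hcd
      rcases he e (List.mem_cons_self) with h | h <;>
        subst h <;> simp [List.countP_cons, hcd, Ne.symm hcd, ht, List.count_cons]

theorem pv_bool_eq_of_iff {a b : Bool} (h : a = true ↔ b = true) : a = b := by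
  cases a <;> cases b <;> simp_all

-- ===== VERDICT (by name: the statement is the Claim_ definition above) =====
theorem is_a_dyck_word_spec : Claim_equal_is_a_dyck_word := by
  intro word _
  unfold Spec_is_a_dyck_word is_a_dyck_word is_a_dyck_word_alt
    pvA_twoUniqueChars pvA_charDeltaZero pvA_prefixZeroPlus
  cases hw : word.toList with
  | nil => simp [hw, PySem.Str.len]
  | cons c rest =>
      have hne : word ≠ "" := by
        intro h; rw [h] at hw; simp at hw
      by_cases h2 : (PySem.Set.len (PySem.Set.ofList (c :: rest)) == 2) = true
      · -- two distinct characters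
        have h2' : (PySem.Set.ofList (c :: rest)).length = 2 := by
          have h' : ((PySem.Set.ofList (c :: rest)).length : Int) = 2 := by
            simpa [PySem.Set.len] using h2
          exact_mod_cast h'
        obtain ⟨d, hS⟩ := pv_set_two c rest h2'
        have hnd : (PySem.Set.ofList (c :: rest)).Nodup := PySem.Set.nodup_ofList _
        have hcd : c ≠ d := by
          rw [hS] at hnd; simpa using hnd
        have hmem : ∀ e ∈ (c :: rest), e = c ∨ e = d := by
          intro e hee
          have : e ∈ PySem.Set.ofList (c :: rest) := by
            rw [PySem.Set.mem_ofList]; exact hee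
          rw [hS] at this; simpa using this
        have hinit : (PySem.Str.pyGet? word 0).getD ' ' = c := by
          simp [hw]
        have hcnt : ∀ x : Char, PySem.Str.count word (String.ofList [x]) = word.toList.count x := by
          intro x; simp [pv_count_singleton]
        simp only [hw] at hcnt
        simp only [hw, List.isEmpty_cons, Bool.false_eq_true, if_false, hS, hinit,
          List.foldl, List.nil_append, List.singleton_append, hcnt]
        have e0 : (PySem.List.pyGet? [(((c :: rest).count c : Int)), (((c :: rest).count d : Int))] 0).getD 0
            = ((c :: rest).count c : Int) := by
          simp [PySem.List.pyGet?, PySem.List.pyIdx?]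
        have e1 : (PySem.List.pyGet? [(((c :: rest).count c : Int)), (((c :: rest).count d : Int))] 1).getD 0
            = ((c :: rest).count d : Int) := by
          simp [PySem.List.pyGet?, PySem.List.pyIdx?]
        rw [e0, e1]
        have hlen0 : (PySem.Str.len word == 0) = false := by
          simp [PySem.Str.len, hw]; omega
        have hset2 : (PySem.Set.len ([c, d] : List Char) == 2) = true := by
          simp [PySem.Set.len]
        have hOeq : (List.map (fun q => q.1) (List.filter (fun q => q.2 == c)
            (PySem.List.enumerate (c :: rest) 0))) = pvPosns (fun ch => ch == c) (c :: rest) 0 :=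
          pv_posns_eq (fun ch => ch == c) (c :: rest) 0
        have hCeq : (List.map (fun q => q.1) (List.filter (fun q => !(q.2 == c))
            (PySem.List.enumerate (c :: rest) 0))) = pvPosns (fun ch => !(ch == c)) (c :: rest) 0 :=
          pv_posns_eq (fun ch => !(ch == c)) (c :: rest) 0
        rw [hlen0, hOeq, hCeq]
        simp only [hset2, Bool.not_true, Bool.false_eq_true, if_false]
        have hOlen := pv_posns_length (fun ch => ch == c) (c :: rest) 0
        have hClen := pv_posns_length (fun ch => !(ch == c)) (c :: rest) 0
        rw [pv_countP_eq_count] at hOlen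
        rw [pv_countP_not_eq_count c d _ hmem hcd] at hClen
        by_cases hcc : (c :: rest).count c = (c :: rest).count d
        · -- counts equal: delta gate and length gate both pass
          have hdz : (((c :: rest).count c : Int) - ((c :: rest).count d : Int) == 0) = true :=
            beq_iff_eq.mpr (by rw [sub_eq_zero]; exact_mod_cast hcc)
          have hlenEq : ((pvPosns (fun ch => ch == c) (c :: rest) 0).length
              == (pvPosns (fun ch => !(ch == c)) (c :: rest) 0).length) = true := by
            rw [hOlen, hClen, hcc]; exact beq_self_eq_true _
          have hn : (c :: rest).countP (fun ch => ch == c)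
              = (c :: rest).countP (fun ch => !(ch == c)) := by
            rw [pv_countP_eq_count, pv_countP_not_eq_count c d _ hmem hcd]; exact hcc
          have hmain : pvA_prefixLoop c (c :: rest) 0
              = ((pvPosns (fun ch => ch == c) (c :: rest) 0).zip
                  (pvPosns (fun ch => !(ch == c)) (c :: rest) 0)).all (fun q => decide (q.1 < q.2)) := by
            apply pv_bool_eq_of_iff
            rw [pv_zip_all_iff, pv_zip_iff c _ hn]
            have := pv_loop_iff c (c :: rest) 0 le_rfl
            rw [this]
            constructor
            · intro h k hk; have := h k hk; omega
            · intro h k hk; have := h k hk; omega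
          rw [hdz, hlenEq, hmain]
          cases ((pvPosns (fun ch => ch == c) (c :: rest) 0).zip
              (pvPosns (fun ch => !(ch == c)) (c :: rest) 0)).all (fun q => decide (q.1 < q.2)) <;>
            simp
        · -- counts differ: delta gate and length gate both fail
          have hdz : (((c :: rest).count c : Int) - ((c :: rest).count d : Int) == 0) = false := by
            rw [beq_eq_false_iff_ne]
            intro h
            exact hcc (by exact_mod_cast sub_eq_zero.mp h)
          have hlenEq : ((pvPosns (fun ch => ch == c) (c :: rest) 0).length
              == (pvPosns (fun ch => !(ch == c)) (c :: rest) 0).length) = false := by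
            rw [hOlen, hClen, beq_eq_false_iff_ne]; exact hcc
          rw [hdz, hlenEq]
          simp
      · -- not exactly two distinct characters: both sides false
        have hlen0 : (PySem.Str.len word == 0) = false := by
          simp [PySem.Str.len, hw]; omega
        have hg : (PySem.Set.len (PySem.Set.ofList (c :: rest)) == 2) = false :=
          Bool.eq_false_iff.mpr h2
        rw [hlen0, hg]
        simp
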